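-- pv_equiv track=rewrite | github.com/dgraham-io/recorz | tools/build_qemu_riscv_mvp_image.py | split_kernel_method_chunks
-- ===== SOURCE A (Python) =====
-- def split_kernel_method_chunks(source_text: str) -> list[str]:
--     chunks: list[str] = []
--     chunk_lines: list[str] = []
--
--     for line in source_text.splitlines():
--         if line.strip() == "!":
--             chunk = "\n".join(chunk_lines).strip()
--             if chunk:
--                 chunks.append(chunk)
--             chunk_lines = []
--             continue
--         chunk_lines.append(line)
--     trailing_chunk = "\n".join(chunk_lines).strip()
--     if trailing_chunk:
--         chunks.append(trailing_chunk)
--     return chunks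
-- ===== SOURCE B (Python) =====
-- def split_kernel_method_chunks(source_text: str) -> list[str]:
--     # Two-pointer segment scan over the line array: for each segment [start, end)
--     # bounded by "!" delimiter lines (or the ends of the array), join and strip it
--     # directly; no line buffer and no separate trailing flush.
--     lines = source_text.splitlines()
--     n = len(lines)
--     chunks: list[str] = []
--     start = 0
--     while start <= n:
--         end = start
--         while end < n and lines[end].strip() != "!":
--             end += 1
--         chunk = "\n".join(lines[start:end]).strip()
--         if chunk:
--             chunks.append(chunk)
--         start = end + 1
--     return chunks
-- ===== Notes on version B (the rewrite author's own statement) =====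
-- stated objective: alternative
-- what changed: Replaces A's line-by-line buffer loop with a flush-on-delimiter branch and a duplicated trailing flush by a two-pointer scan over the line array: an inner loop finds the end of each delimiter-bounded segment and the chunk is joined directly from the slice lines[start:end], with no buffer and no trailing special case.
import Mathlib
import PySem

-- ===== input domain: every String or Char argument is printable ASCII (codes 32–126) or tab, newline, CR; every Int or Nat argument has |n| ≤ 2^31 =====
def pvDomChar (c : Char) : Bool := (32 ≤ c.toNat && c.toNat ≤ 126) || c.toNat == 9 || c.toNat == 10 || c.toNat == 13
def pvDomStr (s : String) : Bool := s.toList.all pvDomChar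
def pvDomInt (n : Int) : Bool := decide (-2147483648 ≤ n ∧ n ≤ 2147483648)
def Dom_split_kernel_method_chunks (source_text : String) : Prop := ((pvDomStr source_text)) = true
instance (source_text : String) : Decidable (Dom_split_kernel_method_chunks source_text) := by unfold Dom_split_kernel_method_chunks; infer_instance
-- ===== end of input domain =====

-- B replaces A's buffer loop (flush on "!" plus a duplicated trailing flush) by a two-pointer
-- segment scan over the line array, joining each slice lines[start:end] directly; alternative
-- decomposition, same cost.


-- ===== PORT A =====
-- the body of A's for-loop: flush the buffer on a "!" line, otherwise append the line
def pvStepA (s : List String × List String) (line : String) : List String × List String :=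
  if PySem.Str.strip line = "!" then
    let chunk := PySem.Str.strip (PySem.Str.join "\n" s.2)
    ((if chunk ≠ "" then s.1 ++ [chunk] else s.1), [])
  else (s.1, s.2 ++ [line])

def split_kernel_method_chunks (source_text : String) : List String :=
  let st := (PySem.Str.splitlines source_text).foldl pvStepA ([], [])
  let trailing := PySem.Str.strip (PySem.Str.join "\n" st.2)
  if trailing ≠ "" then st.1 ++ [trailing] else st.1

-- ===== PORT B =====
-- inner while loop: advance end while end < n and lines[end].strip() != "!"
-- (lines.getD e "" is exact for Python's lines[end]: the loop guard gives e < n = lines.length)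
def pvScanEnd (lines : List String) (n : Nat) (e : Nat) : Nat :=
  if h : e < n ∧ PySem.Str.strip (lines.getD e "") ≠ "!" then pvScanEnd lines n (e + 1) else e
termination_by n - e
decreasing_by omega

-- used by pvOuter's termination: the inner scan never moves end backwards
theorem pvScanEnd_ge (lines : List String) (n e : Nat) : e ≤ pvScanEnd lines n e := by
  unfold pvScanEnd
  split
  · have := pvScanEnd_ge lines n (e + 1); omega
  · omega
termination_by n - e
decreasing_by omega

-- outer while loop over start; lines[start:end] is PySem.List.slice (exact Python slice)
def pvOuter (lines : List String) (n : Nat) (chunks : List String) (start : Nat) : List String :=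
  if h : start ≤ n then
    let e := pvScanEnd lines n start
    let chunk := PySem.Str.strip (PySem.Str.join "\n"
      (PySem.List.slice lines (some (start : Int)) (some (e : Int))))
    pvOuter lines n (if chunk ≠ "" then chunks ++ [chunk] else chunks) (e + 1)
  else chunks
termination_by n + 1 - start
decreasing_by have := pvScanEnd_ge lines n start; omega

def split_kernel_method_chunks_alt (source_text : String) : List String :=
  let lines := PySem.Str.splitlines source_text
  pvOuter lines lines.length [] 0

-- ===== PRECONDITION & SPEC =====
def Spec_split_kernel_method_chunks (source_text : String) (out : List String) : Prop := out = split_kernel_method_chunks_alt source_text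
instance (source_text : String) (out : List String) : Decidable (Spec_split_kernel_method_chunks source_text out) := by unfold Spec_split_kernel_method_chunks; infer_instance

-- ===== CLAIM (what is proved, stated in full; the proofs are below) =====
def Claim_equal_split_kernel_method_chunks : Prop := ∀ (source_text : String), Dom_split_kernel_method_chunks source_text → Spec_split_kernel_method_chunks source_text (split_kernel_method_chunks source_text)

-- ===== LEMMAS AND PROOFS =====

-- the predicate "this line is NOT a delimiter" (inner-loop guard / buffer-extend condition)
def pvQ (l : String) : Bool := PySem.Str.strip l != "!"

-- one flushed chunk, as a 0/1-element list
def pvEmit (buf : List String) : List String :=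
  let c := PySem.Str.strip (PySem.Str.join "\n" buf)
  if c ≠ "" then [c] else []

-- recursive characterisation of A's remaining output given the current buffer
def pvArun (buf : List String) : List String → List String
  | [] => pvEmit buf
  | l :: ls => if PySem.Str.strip l = "!" then pvEmit buf ++ pvArun [] ls else pvArun (buf ++ [l]) ls

theorem pvStepA_delim (chunks buf : List String) (l : String)
    (h : PySem.Str.strip l = "!") : pvStepA (chunks, buf) l = (chunks ++ pvEmit buf, []) := by
  simp only [pvStepA, pvEmit, h, if_pos]
  split <;> simp

theorem pvStepA_other (chunks buf : List String) (l : String)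
    (h : ¬ PySem.Str.strip l = "!") : pvStepA (chunks, buf) l = (chunks, buf ++ [l]) := by
  simp [pvStepA, h]

theorem pvA_fold (lines : List String) : ∀ (chunks buf : List String),
    (let st := lines.foldl pvStepA (chunks, buf)
     let trailing := PySem.Str.strip (PySem.Str.join "\n" st.2)
     if trailing ≠ "" then st.1 ++ [trailing] else st.1)
      = chunks ++ pvArun buf lines := by
  induction lines with
  | nil =>
      intro chunks buf
      simp only [List.foldl_nil, pvArun, pvEmit]
      split <;> simp
  | cons l ls ih =>
      intro chunks buf
      by_cases h : PySem.Str.strip l = "!"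
      · rw [List.foldl_cons, pvStepA_delim _ _ _ h, ih]
        simp [pvArun, h]
      · rw [List.foldl_cons, pvStepA_other _ _ _ h, ih]
        simp [pvArun, h]

-- A's run, re-expressed segment-wise: emit the non-delimiter prefix, then continue past the delimiter
theorem pvArun_segment (ls : List String) : ∀ (buf : List String),
    pvArun buf ls = pvEmit (buf ++ ls.takeWhile pvQ) ++
      (match ls.dropWhile pvQ with
       | [] => []
       | _ :: rest => pvArun [] rest) := by
  induction ls with
  | nil => intro buf; simp [pvArun, List.takeWhile_nil, List.dropWhile_nil]
  | cons l ls ih =>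
      intro buf
      by_cases h : PySem.Str.strip l = "!"
      · have hq : pvQ l = false := by simp [pvQ, h]
        simp only [pvArun, h, if_true, List.takeWhile_cons, List.dropWhile_cons, hq]
        simp
      · have hq : pvQ l = true := by simp [pvQ, h]
        simp only [pvArun, h, if_false, List.takeWhile_cons, List.dropWhile_cons, hq, ih (buf ++ [l])]
        simp

-- prefix/suffix facts for takeWhile/dropWhile as take/drop
theorem pvTake_takeWhile {α : Type} (l : List α) (p : α → Bool) :
    l.take (l.takeWhile p).length = l.takeWhile p :=
  calc l.take (l.takeWhile p).length
      = (l.takeWhile p ++ l.dropWhile p).take (l.takeWhile p).length := by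
        rw [List.takeWhile_append_dropWhile]
    _ = l.takeWhile p := List.take_left ..

theorem pvDrop_takeWhile {α : Type} (l : List α) (p : α → Bool) :
    l.drop (l.takeWhile p).length = l.dropWhile p :=
  calc l.drop (l.takeWhile p).length
      = (l.takeWhile p ++ l.dropWhile p).drop (l.takeWhile p).length := by
        rw [List.takeWhile_append_dropWhile]
    _ = l.dropWhile p := List.drop_left ..

-- the inner while loop computes start + (length of the non-delimiter prefix of lines.drop start)
theorem pvScanEnd_eq (lines : List String) (e : Nat) :
    pvScanEnd lines lines.length e = e + ((lines.drop e).takeWhile pvQ).length := by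
  unfold pvScanEnd
  split
  · rename_i h
    have hd : lines.drop e = lines[e] :: lines.drop (e + 1) := List.drop_eq_getElem_cons h.1
    have hg : lines.getD e "" = lines[e] := List.getD_eq_getElem lines "" h.1
    have hq : pvQ lines[e] = true := by
      simp only [pvQ, bne_iff_ne]; rw [← hg]; exact h.2
    rw [pvScanEnd_eq lines (e + 1), hd, List.takeWhile_cons, hq]
    simp; omega
  · rename_i h
    by_cases he : e < lines.length
    · have h2 : PySem.Str.strip (lines.getD e "") = "!" := by
        by_contra hc; exact h ⟨he, hc⟩
      have hd : lines.drop e = lines[e] :: lines.drop (e + 1) := List.drop_eq_getElem_cons he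
      have hg : lines.getD e "" = lines[e] := List.getD_eq_getElem lines "" he
      have hq : pvQ lines[e] = false := by simp only [pvQ, bne_eq_false_iff_eq]; rw [← hg, h2]
      rw [hd, List.takeWhile_cons, hq]; simp
    · rw [List.drop_eq_nil_of_le (by omega)]; simp
termination_by lines.length - e
decreasing_by omega

-- main loop invariant: B's outer loop equals A's remaining run on lines.drop start
theorem pvOuter_eq (lines : List String) (chunks : List String) (start : Nat)
    (h : start ≤ lines.length) :
    pvOuter lines lines.length chunks start = chunks ++ pvArun [] (lines.drop start) := by
  unfold pvOuter
  rw [dif_pos h]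
  have hscan := pvScanEnd_eq lines start
  set ls := lines.drop start with hls
  set k := (ls.takeWhile pvQ).length with hk
  have hlen : ls.length = lines.length - start := by rw [hls]; simp
  have hkle : k ≤ ls.length := by
    rw [hk]; exact (List.takeWhile_prefix (p := pvQ) (l := ls)).length_le
  have hslice : PySem.List.slice lines (some (start : Int)) (some (((start + k : Nat)) : Int))
      = ls.takeWhile pvQ := by
    rw [PySem.List.slice_natCast]
    have h2 : start + k - start = k := by omega
    rw [h2, ← hls, hk]
    exact pvTake_takeWhile ls pvQ
  simp only [hscan, hslice]
  have hdw : ls.drop k = ls.dropWhile pvQ := by rw [hk, pvDrop_takeWhile]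
  rw [pvArun_segment ls []]
  simp only [List.nil_append]
  cases hcase : ls.dropWhile pvQ with
  | nil =>
      have hke : k = ls.length := by
        have := List.takeWhile_append_dropWhile (p := pvQ) (l := ls)
        rw [hcase, List.append_nil] at this
        rw [hk, this]
      have hstop : ¬ (start + k + 1 ≤ lines.length) := by omega
      rw [pvOuter, dif_neg hstop]
      simp only [pvEmit]
      split <;> simp
  | cons d rest =>
      have hklt : k < ls.length := by
        by_contra hc
        have : ls.drop k = [] := List.drop_eq_nil_of_le (by omega)
        rw [hdw, hcase] at this; simp at this
      have hdrop : lines.drop (start + k + 1) = rest := by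
        have h1 : lines.drop (start + k) = ls.drop k := by
          rw [hls, List.drop_drop]
        have h2 : lines.drop (start + k + 1) = (lines.drop (start + k)).drop 1 := by
          rw [List.drop_drop]
        rw [h2, h1, hdw, hcase]; simp
      rw [pvOuter_eq lines _ (start + k + 1) (by omega), hdrop]
      simp only [pvEmit]
      split <;> simp
termination_by lines.length + 1 - start
decreasing_by have := pvScanEnd_ge lines lines.length start; omega

-- ===== VERDICT (by name: the statement is the Claim_ definition above) =====
theorem split_kernel_method_chunks_spec : Claim_equal_split_kernel_method_chunks := by
  intro s _
  unfold Spec_split_kernel_method_chunks split_kernel_method_chunks split_kernel_method_chunks_alt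
  have hA := pvA_fold (PySem.Str.splitlines s) [] []
  have hB := pvOuter_eq (PySem.Str.splitlines s) [] 0 (Nat.zero_le _)
  simp only [List.nil_append, List.drop_zero] at hA hB
  rw [hB]
  exact hA
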